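-- pv_equiv track=rewrite | github.com/a1phabeta/bf.py | bf.py | make_brace_map
-- ===== SOURCE A (Python) =====
-- import collections
-- from typing import Dict
--
-- def make_brace_map(program: str) -> Dict:
--     """Creates a brace map for interpreting command blocks
--
--     Args:
--         code (str): The code to be run
--
--     Returns:
--         Dict: The brace map
--     """
--     temp_stack = collections.deque()
--     brace_map = {}
--
--     for position, command in enumerate(program):
--         if command == '[':
--             temp_stack.append(position)
--         if command == ']':
--             start = temp_stack.popleft()
--             brace_map[start] = position
--             brace_map[position] = start
--     return brace_map
-- ===== SOURCE B (Python) =====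
-- def make_brace_map(program: str):
--     """Creates a brace map for interpreting command blocks.
--
--     Pairs the j-th '[' with the j-th ']' (A's FIFO pairing), built from two
--     position lists instead of a running queue."""
--     opens = [i for i, c in enumerate(program) if c == '[']
--     closes = [i for i, c in enumerate(program) if c == ']']
--     brace_map = {}
--     for start, close in zip(opens, closes):
--         brace_map[start] = close
--         brace_map[close] = start
--     return brace_map
-- ===== Notes on version B (the rewrite author's own statement) =====
-- stated objective: simpler
-- what changed: B replaces A's running deque with two comprehension-built position lists (indices of '[' and of ']') zipped together, so the pairing loop carries no queue state; Pre_ excludes programs with an unmatched ']' (some prefix with more ']' than '['), where A raises IndexError.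
-- outside the precondition, e.g. on make_brace_map(']'): A raises IndexError, B returns {}
import Mathlib
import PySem

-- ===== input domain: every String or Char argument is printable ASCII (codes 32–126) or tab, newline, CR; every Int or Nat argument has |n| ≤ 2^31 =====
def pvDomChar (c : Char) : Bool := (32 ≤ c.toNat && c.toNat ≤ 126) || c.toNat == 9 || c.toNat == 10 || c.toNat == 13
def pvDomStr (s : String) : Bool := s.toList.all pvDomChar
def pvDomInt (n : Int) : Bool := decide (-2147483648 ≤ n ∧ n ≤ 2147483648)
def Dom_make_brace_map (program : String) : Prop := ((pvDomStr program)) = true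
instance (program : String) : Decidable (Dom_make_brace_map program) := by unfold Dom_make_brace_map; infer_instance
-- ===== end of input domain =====

-- B is a simpler decomposition of the same O(n) pairing: two position lists zipped, no queue state.

-- ===== PORT A =====
-- loop body of A: push '[' positions, on ']' popleft (none = IndexError) and record both directions
def stepA (st : Option (List Int × PySem.Dict Int Int)) (pc : Int × Char) :
    Option (List Int × PySem.Dict Int Int) :=
  match st with
  | none => none
  | some (stack, bm) =>
    let stack := if pc.2 == '[' then stack ++ [pc.1] else stack
    if pc.2 == ']' then
      match stack with
      | [] => none
      | start :: rest => some (rest, (bm.insert start pc.1).insert pc.1 start)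
    else some (stack, bm)

def make_brace_map (program : String) : List (Int × Int) :=
  match (PySem.List.enumerate program.toList).foldl stepA (some ([], PySem.Dict.empty)) with
  | none => []   -- unreachable under Pre_ (Python raises IndexError here)
  | some (_, bm) => bm.items

-- ===== PORT B =====
-- opens / closes comprehensions of B
def opsOf (xs : List (Int × Char)) : List Int :=
  xs.filterMap (fun p => if p.2 == '[' then some p.1 else none)

def closOf (xs : List (Int × Char)) : List Int :=
  xs.filterMap (fun p => if p.2 == ']' then some p.1 else none)

def make_brace_map_alt (program : String) : List (Int × Int) :=
  let opens := opsOf (PySem.List.enumerate program.toList)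
  let closes := closOf (PySem.List.enumerate program.toList)
  ((opens.zip closes).foldl
      (fun bm oc => (bm.insert oc.1 oc.2).insert oc.2 oc.1) PySem.Dict.empty).items

-- ===== PRECONDITION & SPEC =====
-- Pre_ excludes exactly the programs on which A raises IndexError: some prefix
-- contains more ']' than '[' (the deque is empty at that ']').
def Pre_make_brace_map (program : String) : Prop :=
  ∀ n ∈ List.range (program.toList.length + 1),
    (program.toList.take n).count ']' ≤ (program.toList.take n).count '['

instance (program : String) : Decidable (Pre_make_brace_map program) := by
  unfold Pre_make_brace_map; infer_instance

def pvWitness_make_brace_map : String := "[+]"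

def Spec_make_brace_map (program : String) (out : List (Int × Int)) : Prop := out = make_brace_map_alt program
instance (program : String) (out : List (Int × Int)) : Decidable (Spec_make_brace_map program out) := by unfold Spec_make_brace_map; infer_instance

-- ===== CLAIM (what is proved, stated in full; the proofs are below) =====
def Claim_equal_make_brace_map : Prop := ∀ (program : String), Dom_make_brace_map program → Pre_make_brace_map program → Spec_make_brace_map program (make_brace_map program)

-- ===== LEMMAS AND PROOFS =====

-- the pairs both loops insert, in insertion order
def pairsFlat (ps : List (Int × Int)) : List (Int × Int) :=
  ps.flatMap (fun p => [(p.1, p.2), (p.2, p.1)])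

theorem pairsFlat_nil : pairsFlat [] = [] := rfl
theorem pairsFlat_cons (p : Int × Int) (ps : List (Int × Int)) :
    pairsFlat (p :: ps) = (p.1, p.2) :: (p.2, p.1) :: pairsFlat ps := rfl

theorem opsOf_nil : opsOf [] = [] := rfl
theorem opsOf_cons (x : Int × Char) (xs : List (Int × Char)) :
    opsOf (x :: xs) = if x.2 == '[' then x.1 :: opsOf xs else opsOf xs := by
  simp [opsOf, List.filterMap_cons]; split_ifs <;> simp
theorem closOf_nil : closOf [] = [] := rfl
theorem closOf_cons (x : Int × Char) (xs : List (Int × Char)) :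
    closOf (x :: xs) = if x.2 == ']' then x.1 :: closOf xs else closOf xs := by
  simp [closOf, List.filterMap_cons]; split_ifs <;> simp

theorem mem_opsOf {xs : List (Int × Char)} {a : Int} :
    a ∈ opsOf xs ↔ (a, '[') ∈ xs := by
  induction xs with
  | nil => simp [opsOf_nil]
  | cons x xs ih =>
    rcases x with ⟨i, c⟩
    rw [opsOf_cons]
    by_cases h : c = '[' <;> simp [h, ih] <;> aesop

theorem mem_closOf {xs : List (Int × Char)} {a : Int} :
    a ∈ closOf xs ↔ (a, ']') ∈ xs := by
  induction xs with
  | nil => simp [closOf_nil]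
  | cons x xs ih =>
    rcases x with ⟨i, c⟩
    rw [closOf_cons]
    by_cases h : c = ']' <;> simp [h, ih] <;> aesop

-- one ']' step of either loop: two fresh inserts append two items
theorem items_insert2 (d : PySem.Dict Int Int) (o c : Int)
    (ho : o ∉ d.keys) (hc : c ∉ d.keys) (hoc : o ≠ c) :
    ((d.insert o c).insert c o).items = d.items ++ [(o, c), (c, o)] ∧
    ((d.insert o c).insert c o).keys = d.keys ++ [o, c] := by
  have h1 : d.contains o = false := by
    rw [PySem.Dict.contains_eq_decide_mem_keys]; simp [ho]
  have hk1 : (d.insert o c).keys = d.keys ++ [o] :=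
    PySem.Dict.keys_insert_of_not_contains d c h1
  have h2 : (d.insert o c).contains c = false := by
    rw [PySem.Dict.contains_eq_decide_mem_keys, hk1]
    simp [hc, Ne.symm hoc]
  constructor
  · rw [PySem.Dict.items_insert_of_not_contains _ o h2,
        PySem.Dict.items_insert_of_not_contains d c h1]
    simp
  · rw [PySem.Dict.keys_insert_of_not_contains _ o h2, hk1]
    simp

-- A's loop, run from an arbitrary queue/dict state
theorem A_run (xs : List (Int × Char)) : ∀ (q : List Int) (d : PySem.Dict Int Int),
    (∀ n : Nat, (closOf (xs.take n)).length ≤ q.length + (opsOf (xs.take n)).length) →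
    d.keys.Nodup →
    (q ++ xs.map (·.1)).Nodup →
    (∀ a ∈ q, a ∉ d.keys) →
    (∀ p ∈ xs, p.1 ∉ d.keys) →
    ∃ s' d', xs.foldl stepA (some (q, d)) = some (s', d') ∧
      d'.items = d.items ++ pairsFlat ((q ++ opsOf xs).zip (closOf xs)) := by
  induction xs with
  | nil =>
    intro q d _ _ _ _ _
    exact ⟨q, d, rfl, by simp [opsOf_nil, closOf_nil, pairsFlat_nil]⟩
  | cons x rest ih =>
    intro q d avail hkeys hnd hq hxs
    rcases x with ⟨p, c⟩
    by_cases hc : c = ']'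
    · -- pop: q must be nonempty
      subst hc
      have h1 := avail 1
      simp [closOf_cons, opsOf_cons] at h1
      match q, hnd, hq, h1 with
      | s :: qrest, hnd, hq, h1 =>
      -- rearrange the freshness bookkeeping
      have hnd' : (s :: p :: (qrest ++ rest.map (·.1))).Nodup := by
        refine List.Nodup.perm ?_ (List.Perm.cons s List.perm_middle)
        simpa using hnd
      have hsmem : s ∉ p :: (qrest ++ rest.map (·.1)) := (List.nodup_cons.mp hnd').1
      have hnd'' := (List.nodup_cons.mp hnd').2
      have hpmem : p ∉ qrest ++ rest.map (·.1) := (List.nodup_cons.mp hnd'').1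
      have hrestnd : (qrest ++ rest.map (·.1)).Nodup := (List.nodup_cons.mp hnd'').2
      have hsd : s ∉ d.keys := hq s (by simp)
      have hpd : p ∉ d.keys := hxs (p, ']') (by simp)
      have hsp : s ≠ p := by intro h; exact hsmem (by simp [h])
      obtain ⟨hit, hke⟩ := items_insert2 d s p hsd hpd hsp
      obtain ⟨s', d', heq, hitems⟩ := ih qrest ((d.insert s p).insert p s)
        (by
          intro n
          have h2 := avail (n + 1)
          simp only [List.take_succ_cons, closOf_cons, opsOf_cons] at h2
          simp at h2
          omega)
        (by
          rw [hke]
          refine hkeys.append (by simp [hsp]) ?_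
          intro a ha hb
          simp only [List.mem_cons, List.not_mem_nil, or_false] at hb
          rcases hb with rfl | rfl
          · exact hsd ha
          · exact hpd ha)
        hrestnd
        (by
          intro a ha hmem
          rw [hke] at hmem
          rcases List.mem_append.mp hmem with h | h
          · exact hq a (by simp [ha]) h
          · simp only [List.mem_cons, List.not_mem_nil, or_false] at h
            rcases h with rfl | rfl
            · exact hsmem (by simp [ha])
            · exact hpmem (by simp [ha]))
        (by
          intro r hr hmem
          rw [hke] at hmem
          have hrm : r.1 ∈ rest.map (·.1) := List.mem_map.mpr ⟨r, hr, rfl⟩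
          rcases List.mem_append.mp hmem with h | h
          · exact hxs r (by simp [hr]) h
          · simp only [List.mem_cons, List.not_mem_nil, or_false] at h
            rcases h with h | h
            · exact hsmem (by simp [h ▸ hrm])
            · exact hpmem (by simp [h ▸ hrm]))
      refine ⟨s', d', ?_, ?_⟩
      · rw [List.foldl_cons]
        have : stepA (some (s :: qrest, d)) (p, ']') =
            some (qrest, (d.insert s p).insert p s) := by simp [stepA]
        rw [this, heq]
      · rw [hitems, hit]
        simp [opsOf_cons, closOf_cons, pairsFlat_cons]
    · by_cases ho : c = '['
      · subst ho
        obtain ⟨s', d', heq, hitems⟩ := ih (q ++ [p]) d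
          (by
            intro n
            have h2 := avail (n + 1)
            simp only [List.take_succ_cons, closOf_cons, opsOf_cons] at h2
            simp at h2 ⊢
            omega)
          hkeys
          (by simpa [List.append_assoc] using hnd)
          (by
            intro a ha
            rcases List.mem_append.mp ha with h | h
            · exact hq a h
            · simp only [List.mem_cons, List.not_mem_nil, or_false] at h
              exact h ▸ hxs (p, '[') (by simp))
          (fun r hr => hxs r (by simp [hr]))
        refine ⟨s', d', ?_, ?_⟩
        · rw [List.foldl_cons]
          have : stepA (some (q, d)) (p, '[') = some (q ++ [p], d) := by simp [stepA]
          rw [this, heq]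
        · rw [hitems]; simp [opsOf_cons, closOf_cons, List.append_assoc]
      · obtain ⟨s', d', heq, hitems⟩ := ih q d
          (by
            intro n
            have h2 := avail (n + 1)
            simpa only [List.take_succ_cons, closOf_cons, opsOf_cons,
              show ((p, c).2 == ']') = false by simp [hc],
              show ((p, c).2 == '[') = false by simp [ho], if_false] using h2)
          hkeys
          (hnd.sublist (List.Sublist.append_left
            ((rest.map (·.1)).sublist_cons_self p) q))
          hq
          (fun r hr => hxs r (by simp [hr]))
        refine ⟨s', d', ?_, ?_⟩
        · rw [List.foldl_cons]
          have : stepA (some (q, d)) (p, c) = some (q, d) := by simp [stepA, hc, ho]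
          rw [this, heq]
        · rw [hitems]; simp [opsOf_cons, closOf_cons, hc, ho]

-- B's loop
theorem B_run (ps : List (Int × Int)) : ∀ (d : PySem.Dict Int Int),
    d.keys.Nodup →
    (ps.flatMap (fun p => [p.1, p.2])).Nodup →
    (∀ p ∈ ps, p.1 ∉ d.keys ∧ p.2 ∉ d.keys) →
    (ps.foldl (fun bm oc => (bm.insert oc.1 oc.2).insert oc.2 oc.1) d).items =
      d.items ++ pairsFlat ps := by
  induction ps with
  | nil => intro d _ _ _; simp [pairsFlat_nil]
  | cons p rest ih =>
    intro d hkeys hnd hfresh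
    obtain ⟨h1, h2⟩ := hfresh p (by simp)
    simp only [List.flatMap_cons, List.cons_append, List.nil_append,
      List.nodup_cons, List.mem_cons] at hnd
    have hoc : p.1 ≠ p.2 := fun h => hnd.1 (Or.inl h)
    have hp1 : p.1 ∉ rest.flatMap (fun q => [q.1, q.2]) := fun h => hnd.1 (Or.inr h)
    have hp2 : p.2 ∉ rest.flatMap (fun q => [q.1, q.2]) := hnd.2.1
    have hmemflat : ∀ q ∈ rest, q.1 ∈ rest.flatMap (fun r => [r.1, r.2]) ∧
        q.2 ∈ rest.flatMap (fun r => [r.1, r.2]) := by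
      intro q hq
      constructor <;> exact List.mem_flatMap.mpr ⟨q, hq, by simp⟩
    obtain ⟨hit, hke⟩ := items_insert2 d p.1 p.2 h1 h2 hoc
    rw [List.foldl_cons, ih _
      (by rw [hke]
          refine hkeys.append (by simp [hoc]) ?_
          intro a ha hb
          simp only [List.mem_cons, List.not_mem_nil, or_false] at hb
          rcases hb with rfl | rfl
          · exact h1 ha
          · exact h2 ha)
      hnd.2.2
      (by intro q hq
          obtain ⟨m1, m2⟩ := hmemflat q hq
          rw [hke]
          constructor
          · intro hmem
            rcases List.mem_append.mp hmem with h | h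
            · exact (hfresh q (by simp [hq])).1 h
            · simp only [List.mem_cons, List.not_mem_nil, or_false] at h
              rcases h with h | h
              · exact hp1 (h ▸ m1)
              · exact hp2 (h ▸ m1)
          · intro hmem
            rcases List.mem_append.mp hmem with h | h
            · exact (hfresh q (by simp [hq])).2 h
            · simp only [List.mem_cons, List.not_mem_nil, or_false] at h
              rcases h with h | h
              · exact hp1 (h ▸ m2)
              · exact hp2 (h ▸ m2))]
    rw [hit, pairsFlat_cons]; simp

-- enumerate commutes with take
theorem enumerate_take (l : List Char) : ∀ (s : Int) (n : Nat),
    (PySem.List.enumerate l s).take n = PySem.List.enumerate (l.take n) s := by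
  induction l with
  | nil => intro s n; simp [PySem.List.enumerate_nil]
  | cons x xs ih =>
    intro s n
    cases n with
    | zero => simp [PySem.List.enumerate_nil]
    | succ m => simp [PySem.List.enumerate_cons, ih]

theorem len_closOf (l : List Char) : ∀ s : Int,
    (closOf (PySem.List.enumerate l s)).length = l.count ']' := by
  induction l with
  | nil => intro s; simp [PySem.List.enumerate_nil, closOf_nil]
  | cons x xs ih =>
    intro s
    simp only [PySem.List.enumerate_cons, closOf_cons, List.count_cons]
    by_cases h : x = ']' <;> simp [h, ih]

theorem len_opsOf (l : List Char) : ∀ s : Int,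
    (opsOf (PySem.List.enumerate l s)).length = l.count '[' := by
  induction l with
  | nil => intro s; simp [PySem.List.enumerate_nil, opsOf_nil]
  | cons x xs ih =>
    intro s
    simp only [PySem.List.enumerate_cons, opsOf_cons, List.count_cons]
    by_cases h : x = '[' <;> simp [h, ih]

theorem opsOf_sublist (xs : List (Int × Char)) : (opsOf xs).Sublist (xs.map (·.1)) := by
  induction xs with
  | nil => simp [opsOf_nil]
  | cons x rest ih =>
    rw [opsOf_cons]
    by_cases h : x.2 = '[' <;> simp [h]
    · exact ih
    · exact ih.trans (List.sublist_cons_self _ _)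

theorem closOf_sublist (xs : List (Int × Char)) : (closOf xs).Sublist (xs.map (·.1)) := by
  induction xs with
  | nil => simp [closOf_nil]
  | cons x rest ih =>
    rw [closOf_cons]
    by_cases h : x.2 = ']' <;> simp [h]
    · exact ih
    · exact ih.trans (List.sublist_cons_self _ _)

theorem nodup_fst_enumerate (l : List Char) (s : Int) :
    ((PySem.List.enumerate l s).map (·.1)).Nodup := by
  have hp := PySem.List.pairwise_lt_enumerate (xs := l) (s := s)
  exact ((List.pairwise_map).mpr hp).imp ne_of_lt

theorem mem_flat_zip {a b : List Int} {z : Int}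
    (h : z ∈ (a.zip b).flatMap (fun p => [p.1, p.2])) : z ∈ a ∨ z ∈ b := by
  obtain ⟨p, hp, hz⟩ := List.mem_flatMap.mp h
  obtain ⟨h1, h2⟩ := List.of_mem_zip hp
  simp at hz
  rcases hz with rfl | rfl
  · exact Or.inl h1
  · exact Or.inr h2

theorem zipflat_nodup : ∀ (a b : List Int), a.Nodup → b.Nodup → (∀ x ∈ a, x ∉ b) →
    ((a.zip b).flatMap (fun p => [p.1, p.2])).Nodup := by
  intro a
  induction a with
  | nil => intro b _ _ _; simp
  | cons x a' ih =>
    intro b hna hnb hdisj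
    cases b with
    | nil => simp
    | cons y b' =>
      simp only [List.zip_cons_cons, List.flatMap_cons, List.cons_append, List.nil_append,
        List.nodup_cons]
      simp only [List.nodup_cons] at hna hnb
      refine ⟨?_, ?_, ih b' hna.2 hnb.2 ?_⟩
      · simp only [List.mem_cons]
        rintro (rfl | h)
        · exact hdisj x (by simp) (by simp)
        · rcases mem_flat_zip h with h | h
          · exact hna.1 h
          · exact hdisj x (by simp) (by simp [h])
      · intro h
        rcases mem_flat_zip h with h | h
        · exact hdisj y (by simp [h]) (by simp)
        · exact hnb.1 h
      · intro z hz hz'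
        exact hdisj z (by simp [hz]) (by simp [hz'])

theorem ops_clos_disjoint (l : List Char) (s : Int) :
    ∀ x ∈ opsOf (PySem.List.enumerate l s), x ∉ closOf (PySem.List.enumerate l s) := by
  intro x hx hc
  have h1 := mem_opsOf.mp hx
  have h2 := mem_closOf.mp hc
  have hinj := List.inj_on_of_nodup_map (nodup_fst_enumerate l s)
  have := hinj h1 h2 rfl
  simp at this

-- ===== VERDICT (by name: the statement is the Claim_ definition above) =====
theorem make_brace_map_spec : Claim_equal_make_brace_map := by
  intro program _ hpre
  unfold Spec_make_brace_map
  have hempty : (PySem.Dict.empty : PySem.Dict Int Int).items = [] := rfl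
  have hcount : ∀ n : Nat,
      (program.toList.take n).count ']' ≤ (program.toList.take n).count '[' := by
    intro n
    by_cases hn : n ≤ program.toList.length
    · exact hpre n (by rw [List.mem_range]; omega)
    · rw [List.take_of_length_le (by omega)]
      have := hpre program.toList.length (by rw [List.mem_range]; omega)
      rwa [List.take_length] at this
  have avail : ∀ n : Nat,
      (closOf ((PySem.List.enumerate program.toList).take n)).length ≤
      ([] : List Int).length +
        (opsOf ((PySem.List.enumerate program.toList).take n)).length := by
    intro n
    rw [enumerate_take, len_closOf, len_opsOf]
    simpa using hcount n
  have hndA : (([] : List Int) ++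
      (PySem.List.enumerate program.toList).map (·.1)).Nodup := by
    simpa using nodup_fst_enumerate program.toList 0
  obtain ⟨s', d', heq, hitems⟩ :=
    A_run (PySem.List.enumerate program.toList) [] PySem.Dict.empty avail
      (by simp [PySem.Dict.keys, hempty]) hndA (by simp) (by simp)
  have hA : make_brace_map program = d'.items := by
    unfold make_brace_map
    rw [heq]
  have hopsn : (opsOf (PySem.List.enumerate program.toList)).Nodup :=
    (nodup_fst_enumerate program.toList 0).sublist (opsOf_sublist _)
  have hclosn : (closOf (PySem.List.enumerate program.toList)).Nodup :=
    (nodup_fst_enumerate program.toList 0).sublist (closOf_sublist _)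
  have hB : make_brace_map_alt program =
      pairsFlat ((opsOf (PySem.List.enumerate program.toList)).zip
        (closOf (PySem.List.enumerate program.toList))) := by
    unfold make_brace_map_alt
    rw [B_run _ PySem.Dict.empty (by simp [PySem.Dict.keys, hempty])
      (zipflat_nodup _ _ hopsn hclosn (ops_clos_disjoint program.toList 0))
      (by simp [PySem.Dict.keys, hempty])]
    rw [hempty]
    simp
  rw [hA, hB, hitems, hempty]
  simp
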